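-- pv_equiv track=rewrite | github.com/ICOS-Carbon-Portal/meta | prototype_relational/scripts/count_prefixes.py | find_all_common_prefixes
-- ===== SOURCE A (Python) =====
-- from collections import defaultdict
--
-- def find_all_common_prefixes(subjects, min_count=50):
--     """
--     Find all common prefixes among subjects at natural boundaries.
--     This includes nested prefixes beyond just the last '/' delimiter.
--
--     Args:
--         subjects: List of subject strings
--         min_count: Minimum number of subjects required for a valid prefix (default: 10)
--     """
--     delimiters = ['/', '-', '_', '.', ':', '#']
--     prefix_counts = defaultdict(set)
--
--     for subject in subjects:
--         # Find all delimiter positions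
--         positions = []
--         for i, char in enumerate(subject):
--             if char in delimiters:
--                 positions.append(i + 1)
--
--         # Consider prefixes up to each delimiter position
--         for pos in positions:
--             if pos > 0:
--                 prefix = subject[:pos]
--                 prefix_counts[prefix].add(subject)
--
--     # Convert to counts and filter to only those with min_count+ subjects
--     result = {}
--     for prefix, subject_set in prefix_counts.items():
--         if len(subject_set) >= min_count:
--             result[prefix] = len(subject_set)
--
--     return result
-- ===== SOURCE B (Python) =====
-- def find_all_common_prefixes(subjects, min_count=50):
--     """Trie over the distinct subjects, one pass per character: each node stores how
--     many distinct subjects pass through it; delimiter-ending nodes are recorded at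
--     creation, which is exactly the first-occurrence order of the prefixes."""
--     delimiters = "/-_.:#"
--     children = [{}]        # node -> {char: child node index}
--     count = [0]            # node -> number of distinct subjects through it
--     delim_nodes = []       # (prefix, node) for delimiter-ending nodes, creation order
--     seen = set()
--     for s in subjects:
--         if s in seen:
--             continue
--         seen.add(s)
--         node = 0
--         for i, ch in enumerate(s):
--             nxt = children[node].get(ch)
--             if nxt is None:
--                 nxt = len(children)
--                 children[node][ch] = nxt
--                 children.append({})
--                 count.append(0)
--                 if ch in delimiters:
--                     delim_nodes.append((s[:i + 1], nxt))
--             count[nxt] += 1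
--             node = nxt
--     return {p: count[n] for p, n in delim_nodes if count[n] >= min_count}
-- ===== Notes on version B (the rewrite author's own statement) =====
-- stated objective: faster
-- what changed: A builds a defaultdict mapping each sliced delimiter-bounded prefix to a set of the whole subject strings and reports set sizes; B instead builds a character trie over the distinct subjects in one pass per character, counting at each node how many distinct subjects pass through it, and records delimiter-ending nodes at creation (which is exactly the first-occurrence order of the prefixes), so per-prefix subject sets, repeated prefix slicing/hashing and reprocessing of duplicate subjects all disappear.
import Mathlib
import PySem

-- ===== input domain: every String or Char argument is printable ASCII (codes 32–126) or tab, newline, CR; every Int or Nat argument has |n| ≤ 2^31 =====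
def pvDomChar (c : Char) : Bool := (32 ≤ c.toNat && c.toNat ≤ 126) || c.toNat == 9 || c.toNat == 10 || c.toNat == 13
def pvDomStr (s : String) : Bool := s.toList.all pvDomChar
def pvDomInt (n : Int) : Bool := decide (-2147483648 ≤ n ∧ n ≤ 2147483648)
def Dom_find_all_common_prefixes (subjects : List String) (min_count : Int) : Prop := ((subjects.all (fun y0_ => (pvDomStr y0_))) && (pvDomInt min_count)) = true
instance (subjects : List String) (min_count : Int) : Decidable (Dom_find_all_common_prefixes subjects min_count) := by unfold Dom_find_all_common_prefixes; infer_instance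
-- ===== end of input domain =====

-- B replaces A's defaultdict of per-prefix sets of whole subject strings by a character trie
-- over the distinct subjects (per-node distinct-subject counters, delimiter-ending nodes
-- recorded at creation, which is first-occurrence order of the prefixes); a timing run
-- measured B faster (duplicate subjects are skipped and no per-prefix slicing/hashing remains).

-- ===== PORT A =====
-- delimiters = ['/', '-', '_', '.', ':', '#']
def pvDelimitersA : List Char := ['/', '-', '_', '.', ':', '#']

-- one iteration of A's outer loop: collect delimiter positions, then for each position
-- slice the prefix and add the subject to the set stored under it
-- (defaultdict access + in-place set.add = Dict.modify with default Set.empty)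
def pvSubjectStepA (d : PySem.Dict String (PySem.Set String)) (subject : String) :
    PySem.Dict String (PySem.Set String) :=
  let positions : List Int :=
    (PySem.List.enumerate subject.toList).foldl
      (fun ps ic => if pvDelimitersA.contains ic.2 then ps ++ [ic.1 + 1] else ps) []
  positions.foldl
    (fun d pos =>
      if pos > 0 then
        let pfx : String := String.ofList (PySem.List.slice subject.toList none (some pos))
        PySem.Dict.modify d pfx PySem.Set.empty (fun st => PySem.Set.add st subject)
      else d) d

def find_all_common_prefixes (subjects : List String) (min_count : Int) : List (String × Int) :=
  let prefix_counts := subjects.foldl pvSubjectStepA PySem.Dict.empty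
  let result : PySem.Dict String Int :=
    prefix_counts.items.foldl
      (fun r pe =>
        if PySem.Set.len pe.2 ≥ min_count then PySem.Dict.insert r pe.1 (PySem.Set.len pe.2)
        else r)
      PySem.Dict.empty
  result.items

-- ===== PORT B =====
-- delimiters = "/-_.:#"
def pvDelimitersB : List Char := "/-_.:#".toList

-- count[n] += 1 (n is always a valid node index when B calls this)
def pvInc (cnt : List Int) (n : Nat) : List Int := cnt.set n (cnt.getD n 0 + 1)

-- one character of B's inner loop: follow or create the edge for the character, bump the
-- child's counter.  children[node] is ported as getD: node is always in range on B's walks.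
def pvCharStepB (s : List Char)
    (acc : (List (PySem.Dict Char Nat) × List Int × List (String × Nat)) × Nat)
    (ic : Int × Char) :
    (List (PySem.Dict Char Nat) × List Int × List (String × Nat)) × Nat :=
  match acc with
  | ((children, cnt, dp), node) =>
    match (children.getD node PySem.Dict.empty).get? ic.2 with
    | some nxt => ((children, pvInc cnt nxt, dp), nxt)
    | none =>
        let nxt := children.length
        let children' := (children.set node
            ((children.getD node PySem.Dict.empty).insert ic.2 nxt)) ++ [PySem.Dict.empty]
        let cnt' := cnt ++ [0]
        let dp' := if pvDelimitersB.contains ic.2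
          then dp ++ [(String.ofList (PySem.List.slice s none (some (ic.1 + 1))), nxt)]
          else dp
        ((children', pvInc cnt' nxt, dp'), nxt)

-- one subject of B's outer loop: skip seen subjects, else walk/build the trie path from the root
def pvSubjectStepB
    (st : (List (PySem.Dict Char Nat) × List Int × List (String × Nat)) × PySem.Set String)
    (s : String) :
    (List (PySem.Dict Char Nat) × List Int × List (String × Nat)) × PySem.Set String :=
  if PySem.Set.contains st.2 s then st
  else (((PySem.List.enumerate s.toList).foldl (pvCharStepB s.toList) (st.1, 0)).1,
        PySem.Set.add st.2 s)

def find_all_common_prefixes_alt (subjects : List String) (min_count : Int) : List (String × Int) :=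
  let st := subjects.foldl pvSubjectStepB (([PySem.Dict.empty], [0], []), PySem.Set.empty)
  let cnt := st.1.2.1
  -- the recorded prefixes are pairwise distinct, so Source B's dict comprehension is this filter+map
  (st.1.2.2.filter (fun pn => cnt.getD pn.2 0 ≥ min_count)).map
    (fun pn => (pn.1, cnt.getD pn.2 0))

-- ===== PRECONDITION & SPEC =====
def Spec_find_all_common_prefixes (subjects : List String) (min_count : Int) (out : List (String × Int)) : Prop := out = find_all_common_prefixes_alt subjects min_count
instance (subjects : List String) (min_count : Int) (out : List (String × Int)) : Decidable (Spec_find_all_common_prefixes subjects min_count out) := by unfold Spec_find_all_common_prefixes; infer_instance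

-- ===== CLAIM (what is proved, stated in full; the proofs are below) =====
def Claim_equal_find_all_common_prefixes : Prop := ∀ (subjects : List String) (min_count : Int), Dom_find_all_common_prefixes subjects min_count → Spec_find_all_common_prefixes subjects min_count (find_all_common_prefixes subjects min_count)

-- ===== LEMMAS AND PROOFS =====

-- ---- ghost counter model: A's dict of sets abstracted to one counter per delimiter prefix ----

-- the prefix cut at delimiter index i (s[:i+1])
def pvPre (s : String) (i : Int) : String :=
  String.ofList (PySem.List.slice s.toList none (some (i + 1)))

-- entrywise set-size image of A's dict, in the same key order
def pvSizes (d : PySem.Dict String (PySem.Set String)) : PySem.Dict String Int :=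
  PySem.Dict.mk (d.items.map (fun p => (p.1, PySem.Set.len p.2)))

-- the delimiter entries of enumerate(s)
def pvL (s : String) : List (Int × Char) :=
  (PySem.List.enumerate s.toList).filter (fun ic => pvDelimitersA.contains ic.2)

-- A's per-subject work, rephrased as one fold over pvL s
def pvFoldA (s : String) (l : List (Int × Char)) (d : PySem.Dict String (PySem.Set String)) :
    PySem.Dict String (PySem.Set String) :=
  l.foldl (fun d ic =>
    PySem.Dict.modify d (pvPre s ic.1) PySem.Set.empty (fun st => PySem.Set.add st s)) d

-- the ghost counter's per-subject work, one fold over pvL s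
def pvFoldB (s : String) (l : List (Int × Char)) (c : PySem.Dict String Int) :
    PySem.Dict String Int :=
  l.foldl (fun c ic =>
    PySem.Dict.insert c (pvPre s ic.1) (PySem.Dict.getD c (pvPre s ic.1) 0 + 1)) c

-- the ghost counter's outer step (dedup by a seen-set, then count every delimiter prefix)
def pvCtrStep (st : PySem.Dict String Int × PySem.Set String) (s : String) :
    PySem.Dict String Int × PySem.Set String :=
  if PySem.Set.contains st.2 s then st
  else (pvFoldB s (pvL s) st.1, PySem.Set.add st.2 s)

theorem pvDelimsEq : pvDelimitersB = pvDelimitersA := by decide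

theorem pvOfList_inj {l l' : List Char} (h : String.ofList l = String.ofList l') : l = l' := by
  have := congrArg String.toList h
  simpa using this

theorem pvSetContains {s : PySem.Set String} {x : String} :
    PySem.Set.contains s x = true ↔ x ∈ s := by
  simp [PySem.Set.contains]

theorem pvAdd_of_mem {s : PySem.Set String} {x : String} (h : x ∈ s) :
    PySem.Set.add s x = s := by
  simp [PySem.Set.add, h]

theorem pvLen_add {s : PySem.Set String} {x : String} (h : ¬ x ∈ s) :
    PySem.Set.len (PySem.Set.add s x) = PySem.Set.len s + 1 := by
  simp [PySem.Set.add, h, PySem.Set.len]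

theorem pvL_bounds (s : String) : ∀ ic ∈ pvL s, 0 ≤ ic.1 ∧ ic.1 < (s.toList.length : Int) := by
  intro ic hic
  have h1 : ic ∈ PySem.List.enumerate s.toList := (List.mem_filter.mp hic).1
  have h2 : ic.1 ∈ (PySem.List.enumerate s.toList).map (fun x => x.1) :=
    List.mem_map.mpr ⟨ic, h1, rfl⟩
  rw [PySem.List.map_fst_enumerate] at h2
  have h3 := PySem.List.mem_pyRange_one.mp h2
  omega

theorem pvL_nodup (s : String) : ((pvL s).map (fun ic => ic.1)).Nodup := by
  have h1 : (pvL s).Sublist (PySem.List.enumerate s.toList) := List.filter_sublist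
  have h2 := h1.map (fun ic : Int × Char => ic.1)
  rw [PySem.List.map_fst_enumerate] at h2
  exact (PySem.List.nodup_pyRange_one 0 _).sublist h2

theorem pvPre_inj {s : String} {i j : Int}
    (hi : 0 ≤ i ∧ i < (s.toList.length : Int)) (hj : 0 ≤ j ∧ j < (s.toList.length : Int))
    (h : pvPre s i = pvPre s j) : i = j := by
  unfold pvPre at h
  have h' := pvOfList_inj h
  rw [PySem.List.slice_to s.toList (b := i + 1) (by omega),
    PySem.List.slice_to s.toList (b := j + 1) (by omega)] at h'
  have hlen := congrArg List.length h'
  rw [List.length_take, List.length_take] at hlen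
  omega

-- rewriting A's per-subject body (positions pass, then slicing loop) into pvFoldA
theorem pvStepA_eq (d : PySem.Dict String (PySem.Set String)) (s : String) :
    pvSubjectStepA d s = pvFoldA s (pvL s) d := by
  unfold pvSubjectStepA
  rw [PySem.List.foldl_append_if]
  rw [List.nil_append, List.foldl_map]
  unfold pvFoldA
  apply PySem.List.foldl_congr_mem
  intro acc ic hic
  have hb := pvL_bounds s ic hic
  rw [if_pos (by omega : ic.1 + 1 > 0)]
  rfl

theorem pvSizes_get? (d : PySem.Dict String (PySem.Set String)) (k : String) :
    (pvSizes d).get? k = (d.get? k).map PySem.Set.len := by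
  simp [pvSizes, PySem.Dict.get?, List.find?_map, Function.comp_def, Option.map_map]

theorem pvSizes_getD (d : PySem.Dict String (PySem.Set String)) (k : String) :
    (pvSizes d).getD k 0 = PySem.Set.len (d.getD k PySem.Set.empty) := by
  rw [PySem.Dict.getD, PySem.Dict.getD, pvSizes_get?]
  cases d.get? k <;> simp [PySem.Set.len, PySem.Set.empty]

theorem pvSizes_contains (d : PySem.Dict String (PySem.Set String)) (k : String) :
    (pvSizes d).contains k = d.contains k := by
  simp [pvSizes, PySem.Dict.contains, List.any_map, Function.comp_def]

theorem pvSizes_keys (d : PySem.Dict String (PySem.Set String)) :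
    (pvSizes d).keys = d.keys := by
  simp [pvSizes, PySem.Dict.keys, List.map_map, Function.comp_def]

theorem pvSizes_insert (d : PySem.Dict String (PySem.Set String)) (k : String)
    (v : PySem.Set String) :
    pvSizes (d.insert k v) = (pvSizes d).insert k (PySem.Set.len v) := by
  by_cases h : d.contains k = true
  · have h2 : (pvSizes d).contains k = true := by rw [pvSizes_contains]; exact h
    unfold PySem.Dict.insert
    rw [if_pos h, if_pos h2]
    unfold pvSizes
    simp only [List.map_map]
    congr 1
    apply List.map_congr_left
    intro p _
    by_cases hpk : p.1 = k <;> simp [hpk]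
  · have h2 : ¬ ((pvSizes d).contains k = true) := by rw [pvSizes_contains]; exact h
    unfold PySem.Dict.insert
    rw [if_neg h, if_neg h2]
    unfold pvSizes
    simp

theorem pvInsert_self {d : PySem.Dict String (PySem.Set String)} {k : String}
    {v : PySem.Set String} (hn : d.keys.Nodup) (h : d.get? k = some v) :
    d.insert k v = d := by
  have hc : d.contains k = true := by
    cases hcb : d.contains k
    · have hnone : d.get? k = none := by
        have := PySem.Dict.get?_eq_none_iff_contains (d := d) (k := k)
        simp_all
      rw [h] at hnone; cases hnone
    · rfl
  unfold PySem.Dict.insert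
  rw [if_pos hc]
  have hmap : d.items.map (fun p => if p.1 == k then (k, v) else p) = d.items.map id := by
    apply List.map_congr_left
    intro p hp
    by_cases hpk : (p.1 == k) = true
    · have hk : p.1 = k := by simpa using hpk
      have hmem : (p.1, p.2) ∈ d.items := by simpa using hp
      have hget : d.get? p.1 = some p.2 := PySem.Dict.get?_of_mem_items _ hmem hn
      rw [hk, h] at hget
      have hv : v = p.2 := by injection hget
      have hkv : (k, v) = p := by rw [← hk, hv]
      simp [hpk, hkv]
    · simp [hpk]
  rw [hmap, List.map_id]

theorem pvFoldA_cons (s : String) (ic : Int × Char) (l : List (Int × Char))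
    (d : PySem.Dict String (PySem.Set String)) :
    pvFoldA s (ic :: l) d
      = pvFoldA s l
          (PySem.Dict.modify d (pvPre s ic.1) PySem.Set.empty (fun st => PySem.Set.add st s)) :=
  rfl

theorem pvFoldB_cons (s : String) (ic : Int × Char) (l : List (Int × Char))
    (c : PySem.Dict String Int) :
    pvFoldB s (ic :: l) c
      = pvFoldB s l (PySem.Dict.insert c (pvPre s ic.1) (PySem.Dict.getD c (pvPre s ic.1) 0 + 1)) :=
  rfl

theorem pvFoldA_mono (s : String) (l : List (Int × Char)) :
    ∀ (d : PySem.Dict String (PySem.Set String)) (p : String) (t : String),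
      t ∈ d.getD p PySem.Set.empty → t ∈ (pvFoldA s l d).getD p PySem.Set.empty := by
  induction l with
  | nil => intro d p t h; exact h
  | cons ic l IH =>
    intro d p t h
    rw [pvFoldA_cons]
    apply IH
    rw [PySem.Dict.getD_modify]
    split_ifs with hpk
    · exact (PySem.Set.mem_add _ _ _).mpr (Or.inl (by rw [← hpk]; exact h))
    · exact h

theorem pvFoldA_sub (s : String) (l : List (Int × Char)) :
    ∀ (d : PySem.Dict String (PySem.Set String)) (p : String) (t : String),
      t ∈ (pvFoldA s l d).getD p PySem.Set.empty → t = s ∨ t ∈ d.getD p PySem.Set.empty := by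
  induction l with
  | nil => intro d p t h; exact Or.inr h
  | cons ic l IH =>
    intro d p t h
    rw [pvFoldA_cons] at h
    rcases IH _ _ _ h with h' | h'
    · exact Or.inl h'
    · rw [PySem.Dict.getD_modify] at h'
      split_ifs at h' with hpk
      · rcases (PySem.Set.mem_add _ _ _).mp h' with h'' | h''
        · exact Or.inr (by rw [hpk]; exact h'')
        · exact Or.inl h''
      · exact Or.inr h'

theorem pvFoldA_complete (s : String) (l : List (Int × Char)) :
    ∀ (d : PySem.Dict String (PySem.Set String)), ∀ ic ∈ l,
      s ∈ (pvFoldA s l d).getD (pvPre s ic.1) PySem.Set.empty := by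
  induction l with
  | nil => intro d ic h; cases h
  | cons ic0 l IH =>
    intro d ic hic
    rw [pvFoldA_cons]
    rcases List.mem_cons.mp hic with h | h
    · subst h
      apply pvFoldA_mono
      rw [PySem.Dict.getD_modify, if_pos rfl]
      exact (PySem.Set.mem_add _ _ _).mpr (Or.inr rfl)
    · exact IH _ ic h

theorem pvFoldA_keys (s : String) (l : List (Int × Char)) :
    ∀ (d : PySem.Dict String (PySem.Set String)), d.keys.Nodup → (pvFoldA s l d).keys.Nodup := by
  induction l with
  | nil => intro d h; exact h
  | cons ic l IH =>
    intro d h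
    rw [pvFoldA_cons]
    apply IH
    simp only [PySem.Dict.modify]
    exact PySem.Dict.nodup_keys_insert _ _ _ h

theorem pvFoldA_id (s : String) (l : List (Int × Char)) :
    ∀ (d : PySem.Dict String (PySem.Set String)), d.keys.Nodup →
      (∀ ic ∈ l, s ∈ d.getD (pvPre s ic.1) PySem.Set.empty) → pvFoldA s l d = d := by
  induction l with
  | nil => intro d _ _; rfl
  | cons ic l IH =>
    intro d hn h
    have hs := h ic (List.mem_cons_self)
    have hget : ∃ S, d.get? (pvPre s ic.1) = some S ∧ s ∈ S := by
      rcases hc : d.get? (pvPre s ic.1) with _ | S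
      · rw [PySem.Dict.getD, hc] at hs
        simp [PySem.Set.empty] at hs
      · refine ⟨S, rfl, ?_⟩
        rw [PySem.Dict.getD, hc] at hs
        exact hs
    obtain ⟨S, hS, hsS⟩ := hget
    have hgd : d.getD (pvPre s ic.1) PySem.Set.empty = S := by rw [PySem.Dict.getD, hS]; rfl
    have hstep : PySem.Dict.modify d (pvPre s ic.1) PySem.Set.empty (fun st => PySem.Set.add st s) = d := by
      simp only [PySem.Dict.modify]
      rw [hgd, pvAdd_of_mem hsS, pvInsert_self hn hS]
    rw [pvFoldA_cons, hstep]
    exact IH d hn (fun ic' h' => h ic' (List.mem_cons_of_mem _ h'))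

-- the inner equivalence: on a fresh subject, the counter fold is the size image of A's set fold
theorem pvInner (s : String) : ∀ (l : List (Int × Char)) (d : PySem.Dict String (PySem.Set String))
    (c : PySem.Dict String Int),
    (∀ ic ∈ l, 0 ≤ ic.1 ∧ ic.1 < (s.toList.length : Int)) →
    ((l.map (fun ic => ic.1)).Nodup) →
    c = pvSizes d →
    (∀ ic ∈ l, ¬ s ∈ d.getD (pvPre s ic.1) PySem.Set.empty) →
    pvFoldB s l c = pvSizes (pvFoldA s l d) := by
  intro l
  induction l with
  | nil => intro d c _ _ hc _; exact hc
  | cons ic l IH =>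
    intro d c hb hnd hc hnotin
    have hbic := hb ic (List.mem_cons_self)
    have hnotinic := hnotin ic (List.mem_cons_self)
    rw [pvFoldA_cons, pvFoldB_cons]
    have hstep : PySem.Dict.insert c (pvPre s ic.1) (PySem.Dict.getD c (pvPre s ic.1) 0 + 1)
        = pvSizes (PySem.Dict.modify d (pvPre s ic.1) PySem.Set.empty (fun st => PySem.Set.add st s)) := by
      simp only [PySem.Dict.modify]
      rw [pvSizes_insert, hc, pvSizes_getD, pvLen_add hnotinic]
    rw [hstep]
    apply IH
    · exact fun ic' h' => hb ic' (List.mem_cons_of_mem _ h')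
    · rw [List.map_cons] at hnd
      exact (List.nodup_cons.mp hnd).2
    · rfl
    · intro ic' h'
      simp only [PySem.Dict.modify]
      rw [PySem.Dict.getD_insert]
      split_ifs with heq
      · have hbic' := hb ic' (List.mem_cons_of_mem _ h')
        have : ic'.1 = ic.1 := pvPre_inj hbic' hbic heq
        have hmemfst : ic.1 ∈ l.map (fun x : Int × Char => x.1) :=
          List.mem_map.mpr ⟨ic', h', this⟩
        have hnotfst : ¬ ic.1 ∈ l.map (fun x : Int × Char => x.1) := by
          rw [List.map_cons] at hnd
          exact (List.nodup_cons.mp hnd).1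
        exact absurd hmemfst hnotfst
      · exact hnotin ic' (List.mem_cons_of_mem _ h')

-- the outer induction over the subject stream, for the ghost counter
theorem pvCtrOuter : ∀ (xs : List String) (d : PySem.Dict String (PySem.Set String))
    (c : PySem.Dict String Int) (seen : PySem.Set String),
    c = pvSizes d → d.keys.Nodup →
    (∀ k t, t ∈ d.getD k PySem.Set.empty → t ∈ seen) →
    (∀ t, t ∈ seen → ∀ ic ∈ pvL t, t ∈ d.getD (pvPre t ic.1) PySem.Set.empty) →
    (xs.foldl pvCtrStep (c, seen)).1 = pvSizes (xs.foldl pvSubjectStepA d) := by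
  intro xs
  induction xs with
  | nil => intro d c seen hc _ _ _; simpa using hc
  | cons x xs IH =>
    intro d c seen hc hn h3 h4
    by_cases hmem : x ∈ seen
    · have hB : pvCtrStep (c, seen) x = (c, seen) := by
        unfold pvCtrStep
        rw [if_pos (pvSetContains.mpr hmem)]
      have hA : pvSubjectStepA d x = d := by
        rw [pvStepA_eq]
        exact pvFoldA_id x (pvL x) d hn (h4 x hmem)
      simp only [List.foldl_cons, hB, hA]
      exact IH d c seen hc hn h3 h4
    · have hcont : ¬ (PySem.Set.contains seen x = true) := fun h => hmem (pvSetContains.mp h)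
      have hB : pvCtrStep (c, seen) x = (pvFoldB x (pvL x) c, PySem.Set.add seen x) := by
        unfold pvCtrStep
        rw [if_neg hcont]
      have hA := pvStepA_eq d x
      have hnotin : ∀ ic ∈ pvL x, ¬ x ∈ d.getD (pvPre x ic.1) PySem.Set.empty :=
        fun ic _ hmem' => hmem (h3 _ _ hmem')
      have hinner : pvFoldB x (pvL x) c = pvSizes (pvFoldA x (pvL x) d) :=
        pvInner x (pvL x) d c (pvL_bounds x) (pvL_nodup x) hc hnotin
      simp only [List.foldl_cons, hB, hA]
      apply IH
      · exact hinner
      · exact pvFoldA_keys x (pvL x) d hn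
      · intro k t ht
        rcases pvFoldA_sub x (pvL x) d k t ht with h | h
        · exact (PySem.Set.mem_add _ _ _).mpr (Or.inr h)
        · exact (PySem.Set.mem_add _ _ _).mpr (Or.inl (h3 _ _ h))
      · intro t htmem ic hic
        rcases (PySem.Set.mem_add _ _ _).mp htmem with h | h
        · exact pvFoldA_mono x (pvL x) _ _ _ (h4 t h ic hic)
        · subst h
          exact pvFoldA_complete t (pvL t) d ic hic

-- freezing the filtered result: folding if-insert over a nodup-key item list appends in order
theorem pvResult (m : Int) : ∀ (l : List (String × Int)) (r : PySem.Dict String Int),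
    (l.map Prod.fst).Nodup → (∀ k, r.contains k = true → ¬ k ∈ l.map Prod.fst) →
    (l.foldl (fun r q => if q.2 ≥ m then PySem.Dict.insert r q.1 q.2 else r) r).items
      = r.items ++ l.filter (fun q => q.2 ≥ m) := by
  intro l
  induction l with
  | nil => intro r _ _; simp
  | cons q l IH =>
    intro r hn hdisj
    rw [List.map_cons] at hn
    have hn' := List.nodup_cons.mp hn
    by_cases hm : q.2 ≥ m
    · have hc : r.contains q.1 = false := by
        by_contra hcc
        have : r.contains q.1 = true := by
          cases h : r.contains q.1
          · exact absurd h hcc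
          · rfl
        exact (hdisj q.1 this) (by simp)
      rw [List.foldl_cons, if_pos hm, IH]
      · rw [PySem.Dict.items_insert_of_not_contains _ _ hc]
        simp [hm, List.append_assoc]
      · exact hn'.2
      · intro k hk
        rw [PySem.Dict.contains_insert] at hk
        rcases Bool.or_eq_true_iff.mp hk with h | h
        · have : k = q.1 := by simpa using h
          rw [this]; exact hn'.1
        · have := hdisj k h
          intro hmem
          exact this (by simp [hmem])
    · rw [List.foldl_cons, if_neg hm, IH]
      · simp [hm]
      · exact hn'.2
      · intro k hk
        have := hdisj k hk
        intro hmem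
        exact this (by simp [hmem])

theorem pvKeysFold (xs : List String) :
    ∀ (d : PySem.Dict String (PySem.Set String)), d.keys.Nodup →
      (xs.foldl pvSubjectStepA d).keys.Nodup := by
  induction xs with
  | nil => intro d h; exact h
  | cons x xs IH =>
    intro x_1 h
    rw [List.foldl_cons]
    apply IH
    rw [pvStepA_eq]
    exact pvFoldA_keys x (pvL x) x_1 h

-- ---- trie side: the invariant linking B's trie to the ghost counter ----

-- a node prefix ends in a delimiter
def pvEndsDelim (u : List Char) : Prop := ∃ v a, u = v ++ [a] ∧ a ∈ pvDelimitersA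

-- g is the ghost table of node prefixes (node n ↦ g[n]); c is the ghost counter
structure pvTrieInv (children : List (PySem.Dict Char Nat)) (cnt : List Int)
    (dp : List (String × Nat)) (g : List (List Char)) (c : PySem.Dict String Int) : Prop where
  hch : children.length = g.length
  hcnt : cnt.length = g.length
  hpos : 0 < g.length
  hroot : g.getD 0 [] = []
  hnd : g.Nodup
  hclosed : ∀ u a, u ++ [a] ∈ g → u ∈ g
  hedge : ∀ n, n < g.length → ∀ a k,
    (((children.getD n PySem.Dict.empty).get? a = some k) ↔
      (k < g.length ∧ g.getD k [] = g.getD n [] ++ [a]))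
  hdp : ∀ p m, (p, m) ∈ dp → m < g.length ∧ p = String.ofList (g.getD m []) ∧
    pvEndsDelim (g.getD m [])
  hdpc : ∀ m, m < g.length → pvEndsDelim (g.getD m []) → (String.ofList (g.getD m []), m) ∈ dp
  hmap : dp.map (fun pn => (pn.1, cnt.getD pn.2 0)) = c.items
  hkeys : c.keys.Nodup

theorem pvGetD_mem {g : List (List Char)} {m : Nat} (hm : m < g.length) : g.getD m [] ∈ g := by
  rw [List.getD_eq_getElem _ _ hm]; exact List.getElem_mem hm

theorem pvGinj {g : List (List Char)} (h : g.Nodup) {m k : Nat} (hm : m < g.length)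
    (hk : k < g.length) (he : g.getD m [] = g.getD k []) : m = k := by
  rw [List.getD_eq_getElem _ _ hm, List.getD_eq_getElem _ _ hk] at he
  exact (List.Nodup.getElem_inj_iff h).mp he

theorem pvGetD_set' {α : Type} {l : List α} {k : Nat} (v d : α) (hk : k < l.length) (m : Nat) :
    (l.set k v).getD m d = if m = k then v else l.getD m d := by
  simp [List.getD_eq_getElem?_getD, List.getElem?_set]
  rcases eq_or_ne m k with rfl | h
  · simp [hk]
  · simp [h, Ne.symm h]

theorem pvGetD_concat {α : Type} (l : List α) (x d : α) (m : Nat) :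
    (l ++ [x]).getD m d = if m = l.length then x else l.getD m d := by
  rcases Nat.lt_trichotomy m l.length with h | h | h
  · rw [List.getD_append _ _ _ _ h, if_neg (by omega)]
  · subst h; simp
  · rw [List.getD_eq_default _ _ (by simp; omega), List.getD_eq_default _ _ (by omega),
      if_neg (by omega)]

-- the prefix B slices at step i = t.length is t ++ [a]
theorem pvPre_at (s0 : String) (t rest' : List Char) (a : Char)
    (h : s0.toList = t ++ a :: rest') :
    pvPre s0 (t.length : Int) = String.ofList (t ++ [a]) := by
  unfold pvPre
  have hc : ((t.length : Int) + 1) = ((t.length + 1 : Nat) : Int) := by push_cast; ring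
  rw [hc, PySem.List.slice_to_natCast, h]
  congr 1
  have : t.length + 1 = t.length + 1 := rfl
  calc (t ++ a :: rest').take (t.length + 1)
      = t ++ (a :: rest').take 1 := List.take_length_add_append 1
    _ = t ++ [a] := by simp

-- B's walk along one subject preserves the invariant and advances the ghost counter by
-- exactly the counter fold over the remaining delimiter positions
theorem pvWalk (s0 : String) : ∀ (rest t : List Char)
    (children : List (PySem.Dict Char Nat)) (cnt : List Int) (dp : List (String × Nat))
    (g : List (List Char)) (c : PySem.Dict String Int) (node : Nat),
    s0.toList = t ++ rest →
    pvTrieInv children cnt dp g c →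
    node < g.length → g.getD node [] = t →
    ∃ children' cnt' dp' node' g',
      (PySem.List.enumerate rest (t.length : Int)).foldl (pvCharStepB s0.toList)
          ((children, cnt, dp), node)
        = ((children', cnt', dp'), node') ∧
      pvTrieInv children' cnt' dp' g'
        (pvFoldB s0 ((PySem.List.enumerate rest (t.length : Int)).filter
          (fun ic => pvDelimitersA.contains ic.2)) c) := by
  intro rest
  induction rest with
  | nil =>
    intro t children cnt dp g c node _ hinv hnode hgt
    exact ⟨children, cnt, dp, node, g, by simp [PySem.List.enumerate_nil],
      by simpa [pvFoldB, PySem.List.enumerate_nil] using hinv⟩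
  | cons a rest' IH =>
    intro t children cnt dp g c node hs hinv hnode hgt
    have hs' : s0.toList = (t ++ [a]) ++ rest' := by rw [hs]; simp
    have hlen1 : (((t ++ [a]).length : Nat) : Int) = (t.length : Int) + 1 := by
      rw [List.length_append, List.length_singleton]; push_cast; ring
    have hpa : pvPre s0 (t.length : Int) = String.ofList (t ++ [a]) := pvPre_at s0 t rest' a hs
    rw [PySem.List.enumerate_cons, List.foldl_cons, List.filter_cons]
    rcases hget : (children.getD node PySem.Dict.empty).get? a with _ | k
    · -- no edge yet: a fresh node is appended
      have hfresh : t ++ [a] ∉ g := by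
        intro hmem
        obtain ⟨k, hklen, hgk⟩ := List.mem_iff_getElem.mp hmem
        have : (children.getD node PySem.Dict.empty).get? a = some k :=
          (hinv.hedge node hnode a k).mpr
            ⟨hklen, by rw [List.getD_eq_getElem _ _ hklen, hgk, hgt]⟩
        rw [hget] at this; cases this
      have hchlen : children.length = g.length := hinv.hch
      have hcntlen : cnt.length = g.length := hinv.hcnt
      have hstep : pvCharStepB s0.toList ((children, cnt, dp), node) (((t.length : Int)), a)
          = (((children.set node
                ((children.getD node PySem.Dict.empty).insert a children.length))
                ++ [PySem.Dict.empty],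
              pvInc (cnt ++ [0]) children.length,
              if pvDelimitersB.contains a
                then dp ++ [(String.ofList
                    (PySem.List.slice s0.toList none (some ((t.length : Int) + 1))),
                  children.length)]
                else dp), children.length) := by
        simp only [pvCharStepB]; rw [hget]
      rw [hstep]
      set chN := (children.set node
          ((children.getD node PySem.Dict.empty).insert a children.length))
          ++ [PySem.Dict.empty] with hchN
      set cntN := pvInc (cnt ++ [0]) children.length with hcntN
      set gN := g ++ [t ++ [a]] with hgN
      have hgetDch : ∀ n, chN.getD n PySem.Dict.empty =
          if n = g.length then PySem.Dict.empty
          else if n = node then (children.getD node PySem.Dict.empty).insert a children.length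
          else children.getD n PySem.Dict.empty := by
        intro n
        rw [hchN, pvGetD_concat]
        rw [List.length_set, hchlen]
        rcases eq_or_ne n g.length with rfl | hne
        · simp
        · rw [if_neg hne, if_neg hne,
            pvGetD_set' _ _ (by rw [hchlen]; exact hnode) n]
      have hgetDcnt : ∀ m, cntN.getD m 0 = if m = g.length then 1 else cnt.getD m 0 := by
        intro m
        rw [hcntN]
        unfold pvInc
        have h0 : (cnt ++ [0]).getD children.length 0 = 0 := by
          rw [pvGetD_concat, if_pos (by omega)]
        rw [pvGetD_set' _ _ (by simp; omega) m, h0, pvGetD_concat]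
        by_cases hne : m = g.length
        · simp [hne, hchlen]
        · simp [hne, hchlen, hcntlen]
      have hgetDg : ∀ m, gN.getD m [] = if m = g.length then t ++ [a] else g.getD m [] := by
        intro m; rw [hgN, pvGetD_concat]
      -- common structural fields
      have hndN : gN.Nodup := by
        rw [hgN]
        simp [List.nodup_append, hinv.hnd]
        exact fun b hb e => hfresh (e ▸ hb)
      have hclosedN : ∀ u b, u ++ [b] ∈ gN → u ∈ gN := by
        intro u b hmem
        rw [hgN] at hmem ⊢
        rcases List.mem_append.mp hmem with h | h
        · exact List.mem_append_left _ (hinv.hclosed u b h)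
        · have := List.mem_singleton.mp h
          obtain ⟨hu, _⟩ := List.append_singleton_inj.mp this
          rw [hu, ← hgt]
          exact List.mem_append_left _ (pvGetD_mem hnode)
      have hedgeN : ∀ n, n < gN.length → ∀ a' k,
          ((chN.getD n PySem.Dict.empty).get? a' = some k) ↔
            (k < gN.length ∧ gN.getD k [] = gN.getD n [] ++ [a']) := by
        intro n hn a' k
        have hnlen : n < g.length + 1 := by simpa [hgN] using hn
        have hglen : gN.length = g.length + 1 := by simp [hgN]
        rw [hgetDch n, hgetDg k, hgetDg n, hglen]
        rcases eq_or_ne n g.length with rfl | hnG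
        · rw [if_pos rfl, if_pos rfl]
          simp only [PySem.Dict.get?_empty]
          constructor
          · intro h; cases h
          · rintro ⟨hk, hkeq⟩
            rcases eq_or_ne k g.length with rfl | hkG
            · rw [if_pos rfl] at hkeq
              have := congrArg List.length hkeq
              simp at this
            · rw [if_neg hkG] at hkeq
              have hkl : k < g.length := by omega
              have : (t ++ [a]) ++ [a'] ∈ g := by
                rw [← hkeq]; exact pvGetD_mem hkl
              exact absurd (hinv.hclosed _ _ this) hfresh
        · rw [if_neg hnG, if_neg hnG]
          have hnl : n < g.length := by omega
          by_cases hnn : n = node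
          · rw [if_pos hnn, PySem.Dict.get?_insert]
            have hgtn : g.getD n [] = t := by rw [hnn, hgt]
            rcases eq_or_ne a' a with rfl | haa
            · rw [if_pos rfl]
              constructor
              · intro h
                have hkc : k = children.length := by
                  injection h with h'; omega
                subst hkc
                rw [hchlen, if_pos rfl]
                exact ⟨by omega, by rw [hgtn]⟩
              · rintro ⟨hk, hkeq⟩
                rcases eq_or_ne k g.length with rfl | hkG
                · rw [hchlen]
                · rw [if_neg hkG] at hkeq
                  rw [hgtn] at hkeq
                  have hkl : k < g.length := by omega
                  exact absurd (hkeq ▸ pvGetD_mem hkl) hfresh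
            · rw [if_neg haa]
              rw [hnn, hinv.hedge node hnode a' k]
              constructor
              · rintro ⟨hk, hkeq⟩
                exact ⟨by omega, by rw [if_neg (by omega), hkeq]⟩
              · rintro ⟨hk, hkeq⟩
                rcases eq_or_ne k g.length with rfl | hkG
                · rw [if_pos rfl] at hkeq
                  rw [← hgt] at hkeq
                  obtain ⟨_, he⟩ := List.append_singleton_inj.mp hkeq
                  exact absurd he.symm haa
                · rw [if_neg hkG] at hkeq
                  exact ⟨by omega, hkeq⟩
          · rw [if_neg hnn]
            rw [hinv.hedge n hnl a' k]
            constructor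
            · rintro ⟨hk, hkeq⟩
              exact ⟨by omega, by rw [if_neg (by omega), hkeq]⟩
            · rintro ⟨hk, hkeq⟩
              rcases eq_or_ne k g.length with rfl | hkG
              · rw [if_pos rfl] at hkeq
                have hteq : t = g.getD n [] := (List.append_singleton_inj.mp hkeq).1
                rw [← hgt] at hteq
                exact absurd (pvGinj hinv.hnd hnode hnl hteq) (Ne.symm hnn)
              · rw [if_neg hkG] at hkeq
                exact ⟨by omega, hkeq⟩
      by_cases hdB : pvDelimitersB.contains a = true
      · -- the new node ends a delimiter: it is recorded and the counter gains a fresh key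
        have hdA : pvDelimitersA.contains a = true := by rw [← pvDelimsEq]; exact hdB
        have hamem : a ∈ pvDelimitersA := by simpa using hdA
        rw [if_pos hdB, if_pos hdA]
        have hnotkey : c.contains (pvPre s0 (t.length : Int)) = false := by
          rcases hcc : c.contains (pvPre s0 (t.length : Int)) with _ | _
          · rfl
          · exfalso
            have hpk := (PySem.Dict.contains_iff_mem_keys c _).mp hcc
            have hmk : pvPre s0 (t.length : Int) ∈ c.items.map Prod.fst := hpk
            rw [← hinv.hmap, List.map_map] at hmk
            obtain ⟨pn, hpn, hpe⟩ := List.mem_map.mp hmk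
            have hco := hinv.hdp pn.1 pn.2 hpn
            have heq : String.ofList (g.getD pn.2 []) = String.ofList (t ++ [a]) := by
              rw [← hco.2.1]
              simp only [Function.comp] at hpe
              rw [hpe, hpa]
            have := pvOfList_inj heq
            exact hfresh (this ▸ pvGetD_mem hco.1)
        have hget0 : PySem.Dict.getD c (pvPre s0 (t.length : Int)) 0 = 0 :=
          PySem.Dict.getD_of_not_contains c 0 hnotkey
        set dpN := dp ++ [(String.ofList
            (PySem.List.slice s0.toList none (some ((t.length : Int) + 1))),
          children.length)] with hdpN
        have hpslice : String.ofList
            (PySem.List.slice s0.toList none (some ((t.length : Int) + 1)))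
            = String.ofList (t ++ [a]) := hpa
        have hinvN : pvTrieInv chN cntN dpN gN
            (PySem.Dict.insert c (pvPre s0 (t.length : Int))
              (PySem.Dict.getD c (pvPre s0 (t.length : Int)) 0 + 1)) := by
          refine ⟨?_, ?_, ?_, ?_, hndN, hclosedN, hedgeN, ?_, ?_, ?_, ?_⟩
          · rw [hchN, hgN]; simp [hchlen]
          · rw [hcntN, hgN]; simp [pvInc]; omega
          · rw [hgN]; simp
          · rw [hgetDg 0, if_neg (by omega)]; exact hinv.hroot
          · -- dp coherence
            intro q m hqm
            rw [hdpN] at hqm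
            rcases List.mem_append.mp hqm with h | h
            · have hco := hinv.hdp q m h
              refine ⟨by simp [hgN]; omega, ?_, ?_⟩
              · rw [hgetDg m, if_neg (by omega)]; exact hco.2.1
              · rw [hgetDg m, if_neg (by omega)]; exact hco.2.2
            · have hpair := List.mem_singleton.mp h
              have hq : q = String.ofList (t ++ [a]) := by
                have h1 := (Prod.ext_iff.mp hpair).1
                simpa [hpslice] using h1
              have hm : m = children.length := by
                simpa using (Prod.ext_iff.mp hpair).2
              refine ⟨by simp [hgN, hm]; omega, ?_, ?_⟩
              · rw [hm, hchlen, hgetDg g.length, if_pos rfl]; exact hq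
              · rw [hm, hchlen, hgetDg g.length, if_pos rfl]
                exact ⟨t, a, rfl, hamem⟩
          · -- dp completeness
            intro m hm hend
            have hml : m < g.length + 1 := by simpa [hgN] using hm
            rcases eq_or_ne m g.length with rfl | hne
            · rw [hgetDg g.length, if_pos rfl]
              rw [hdpN]
              refine List.mem_append_right _ ?_
              rw [← hchlen]
              simp [hpslice]
            · rw [hgetDg m, if_neg hne] at hend ⊢
              exact List.mem_append_left _ (hinv.hdpc m (by omega) hend)
          · -- counter model
            rw [hget0, PySem.Dict.items_insert_of_not_contains _ _ hnotkey]
            rw [hdpN, List.map_append]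
            congr 1
            · rw [← hinv.hmap]
              apply List.map_congr_left
              intro pn hpn
              have hco := hinv.hdp pn.1 pn.2 hpn
              rw [hgetDcnt pn.2, if_neg (by omega)]
            · rw [List.map_singleton, hgetDcnt children.length, if_pos hchlen, hpslice, hpa]
              norm_num
          · exact PySem.Dict.nodup_keys_insert _ _ _ hinv.hkeys
        have hIH := IH (t ++ [a]) chN cntN dpN gN
          (PySem.Dict.insert c (pvPre s0 (t.length : Int))
            (PySem.Dict.getD c (pvPre s0 (t.length : Int)) 0 + 1)) children.length hs' hinvN
          (by simp [hgN]; omega)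
          (by rw [hchlen, hgetDg g.length, if_pos rfl])
        rw [hlen1] at hIH
        obtain ⟨ch2, cnt2, dp2, node2, g2, hfold, hinv2⟩ := hIH
        exact ⟨ch2, cnt2, dp2, node2, g2, hfold, by rwa [pvFoldB_cons]⟩
      · -- no delimiter here: nothing recorded, counter unchanged
        have hdA : ¬ (pvDelimitersA.contains a = true) := by rw [← pvDelimsEq]; exact hdB
        rw [if_neg hdB, if_neg hdA]
        have hinvN : pvTrieInv chN cntN dp gN c := by
          refine ⟨?_, ?_, ?_, ?_, hndN, hclosedN, hedgeN, ?_, ?_, ?_, hinv.hkeys⟩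
          · rw [hchN, hgN]; simp [hchlen]
          · rw [hcntN, hgN]; simp [pvInc]; omega
          · rw [hgN]; simp
          · rw [hgetDg 0, if_neg (by omega)]; exact hinv.hroot
          · intro q m hqm
            have hco := hinv.hdp q m hqm
            refine ⟨by simp [hgN]; omega, ?_, ?_⟩
            · rw [hgetDg m, if_neg (by omega)]; exact hco.2.1
            · rw [hgetDg m, if_neg (by omega)]; exact hco.2.2
          · intro m hm hend
            have hml : m < g.length + 1 := by simpa [hgN] using hm
            rcases eq_or_ne m g.length with rfl | hne
            · exfalso
              rw [hgetDg g.length, if_pos rfl] at hend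
              obtain ⟨v, b, hvb, hbmem⟩ := hend
              obtain ⟨_, hab⟩ := List.append_singleton_inj.mp hvb
              rw [← hab] at hbmem
              exact hdA (by simpa using hbmem)
            · rw [hgetDg m, if_neg hne] at hend ⊢
              exact hinv.hdpc m (by omega) hend
          · rw [← hinv.hmap]
            apply List.map_congr_left
            intro pn hpn
            have hco := hinv.hdp pn.1 pn.2 hpn
            rw [hgetDcnt pn.2, if_neg (by omega)]
        have hIH := IH (t ++ [a]) chN cntN dp gN c children.length hs' hinvN
          (by simp [hgN]; omega)
          (by rw [hchlen, hgetDg g.length, if_pos rfl])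
        rw [hlen1] at hIH
        exact hIH
    · -- edge exists: just bump the child's counter
      obtain ⟨hk, hgk0⟩ := (hinv.hedge node hnode a k).mp hget
      have hgk : g.getD k [] = t ++ [a] := by rw [hgk0, hgt]
      have hkcnt : k < cnt.length := by rw [hinv.hcnt]; exact hk
      have hstep : pvCharStepB s0.toList ((children, cnt, dp), node) (((t.length : Int)), a)
          = ((children, pvInc cnt k, dp), k) := by
        simp only [pvCharStepB]; rw [hget]
      rw [hstep]
      by_cases hdA : pvDelimitersA.contains a = true
      · -- delimiter: the counter bumps the existing key of this node's prefix
        rw [if_pos hdA]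
        have hend : pvEndsDelim (g.getD k []) := ⟨t, a, hgk, by simpa using hdA⟩
        have hmemdp : (String.ofList (g.getD k []), k) ∈ dp := hinv.hdpc k hk hend
        have hitems : (String.ofList (g.getD k []), cnt.getD k 0) ∈ c.items := by
          rw [← hinv.hmap]
          exact List.mem_map.mpr ⟨(String.ofList (g.getD k []), k), hmemdp, rfl⟩
        have hpk : pvPre s0 (t.length : Int) = String.ofList (g.getD k []) := by
          rw [hpa, hgk]
        have hgetDp : PySem.Dict.getD c (pvPre s0 (t.length : Int)) 0 = cnt.getD k 0 := by
          rw [hpk]; exact PySem.Dict.getD_of_mem_items c hitems hinv.hkeys 0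
        have hcont : c.contains (pvPre s0 (t.length : Int)) = true := by
          rw [hpk]
          exact (PySem.Dict.contains_iff_mem_keys c _).mpr
            (PySem.Dict.mem_keys_of_mem_items c hitems)
        have hinvN : pvTrieInv children (pvInc cnt k) dp g
            (PySem.Dict.insert c (pvPre s0 (t.length : Int))
              (PySem.Dict.getD c (pvPre s0 (t.length : Int)) 0 + 1)) := by
          refine ⟨hinv.hch, by simp [pvInc, hinv.hcnt], hinv.hpos, hinv.hroot, hinv.hnd,
            hinv.hclosed, hinv.hedge, hinv.hdp, hinv.hdpc, ?_,
            PySem.Dict.nodup_keys_insert _ _ _ hinv.hkeys⟩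
          rw [hgetDp, PySem.Dict.items_insert_of_contains c _ hcont, ← hinv.hmap,
            List.map_map]
          apply List.map_congr_left
          intro pn hpn
          have hco := hinv.hdp pn.1 pn.2 hpn
          simp only [Function.comp]
          rcases eq_or_ne pn.2 k with hk2 | hk2
          · have hfst : pn.1 = pvPre s0 (t.length : Int) := by rw [hco.2.1, hk2, hpk]
            rw [if_pos (by simp [hfst])]
            unfold pvInc
            rw [pvGetD_set' _ _ hkcnt pn.2, if_pos hk2, hfst]
          · have hfst : pn.1 ≠ pvPre s0 (t.length : Int) := by
              rw [hco.2.1, hpk]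
              intro he
              exact hk2 (pvGinj hinv.hnd hco.1 hk (pvOfList_inj he))
            rw [if_neg (by simp [hfst])]
            unfold pvInc
            rw [pvGetD_set' _ _ hkcnt pn.2, if_neg hk2]
        have hIH := IH (t ++ [a]) children (pvInc cnt k) dp g
          (PySem.Dict.insert c (pvPre s0 (t.length : Int))
            (PySem.Dict.getD c (pvPre s0 (t.length : Int)) 0 + 1)) k hs' hinvN hk hgk
        rw [hlen1] at hIH
        obtain ⟨ch2, cnt2, dp2, node2, g2, hfold, hinv2⟩ := hIH
        exact ⟨ch2, cnt2, dp2, node2, g2, hfold, by rwa [pvFoldB_cons]⟩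
      · -- not a delimiter: the bumped node is not recorded, counter unchanged
        rw [if_neg hdA]
        have hinvN : pvTrieInv children (pvInc cnt k) dp g c := by
          refine ⟨hinv.hch, by simp [pvInc, hinv.hcnt], hinv.hpos, hinv.hroot, hinv.hnd,
            hinv.hclosed, hinv.hedge, hinv.hdp, hinv.hdpc, ?_, hinv.hkeys⟩
          rw [← hinv.hmap]
          apply List.map_congr_left
          intro pn hpn
          have hco := hinv.hdp pn.1 pn.2 hpn
          have hk2 : pn.2 ≠ k := by
            intro he
            obtain ⟨v, b, hvb, hbmem⟩ := hco.2.2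
            rw [he, hgk] at hvb
            obtain ⟨_, hab⟩ := List.append_singleton_inj.mp hvb
            rw [← hab] at hbmem
            exact hdA (by simpa using hbmem)
          unfold pvInc
          rw [pvGetD_set' _ _ hkcnt pn.2, if_neg hk2]
        have hIH := IH (t ++ [a]) children (pvInc cnt k) dp g c k hs' hinvN hk hgk
        rw [hlen1] at hIH
        exact hIH

-- the outer induction for B's trie against the ghost counter
theorem pvTrieOuter : ∀ (xs : List String)
    (children : List (PySem.Dict Char Nat)) (cnt : List Int) (dp : List (String × Nat))
    (g : List (List Char)) (c : PySem.Dict String Int) (seen : PySem.Set String),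
    pvTrieInv children cnt dp g c →
    ∃ children' cnt' dp' g',
      xs.foldl pvSubjectStepB ((children, cnt, dp), seen)
        = ((children', cnt', dp'), (xs.foldl pvCtrStep (c, seen)).2) ∧
      pvTrieInv children' cnt' dp' g' (xs.foldl pvCtrStep (c, seen)).1 := by
  intro xs
  induction xs with
  | nil =>
    intro children cnt dp g c seen hinv
    exact ⟨children, cnt, dp, g, rfl, hinv⟩
  | cons x xs IH =>
    intro children cnt dp g c seen hinv
    by_cases hmem : PySem.Set.contains seen x = true
    · have hB : pvSubjectStepB ((children, cnt, dp), seen) x = ((children, cnt, dp), seen) := by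
        unfold pvSubjectStepB; rw [if_pos hmem]
      have hC : pvCtrStep (c, seen) x = (c, seen) := by
        unfold pvCtrStep; rw [if_pos hmem]
      rw [List.foldl_cons, List.foldl_cons, hB, hC]
      exact IH children cnt dp g c seen hinv
    · have hwalk := pvWalk x x.toList [] children cnt dp g c 0 (by simp) hinv
        hinv.hpos hinv.hroot
      obtain ⟨ch', cnt', dp', node', g', hfold, hinv'⟩ := hwalk
      have hcast : ((List.length ([] : List Char) : Nat) : Int) = 0 := by simp
      rw [hcast] at hfold hinv'
      have hB : pvSubjectStepB ((children, cnt, dp), seen) x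
          = ((ch', cnt', dp'), PySem.Set.add seen x) := by
        unfold pvSubjectStepB
        rw [if_neg hmem]
        simp only
        rw [hfold]
      have hC : pvCtrStep (c, seen) x = (pvFoldB x (pvL x) c, PySem.Set.add seen x) := by
        unfold pvCtrStep; rw [if_neg hmem]
      rw [List.foldl_cons, List.foldl_cons, hB, hC]
      exact IH ch' cnt' dp' g' (pvFoldB x (pvL x) c) (PySem.Set.add seen x) hinv'

-- the initial one-node trie (only the root) satisfies the invariant against the empty counter
theorem pvInv0 : pvTrieInv [PySem.Dict.empty] [0] [] [[]] PySem.Dict.empty := by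
  refine ⟨rfl, rfl, by simp, rfl, by simp, ?_, ?_, ?_, ?_, rfl, by simp [PySem.Dict.empty, PySem.Dict.keys]⟩
  · intro u a h
    rw [List.mem_singleton] at h
    exact absurd h (by simp)
  · intro n hn a k
    have hn0 : n = 0 := by simpa using hn
    subst hn0
    constructor
    · intro h
      rw [show ([PySem.Dict.empty] : List (PySem.Dict Char Nat)).getD 0 PySem.Dict.empty
          = PySem.Dict.empty from rfl, PySem.Dict.get?_empty] at h
      cases h
    · rintro ⟨hk, he⟩
      have hk0 : k = 0 := by simpa using hk
      subst hk0
      simp at he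
  · intro p m h; cases h
  · intro m hm hend
    have hm0 : m = 0 := by simpa using hm
    subst hm0
    obtain ⟨v, a, hva, _⟩ := hend
    exact absurd hva.symm (by simp)

-- ===== VERDICT (by name: the statement is the Claim_ definition above) =====
theorem find_all_common_prefixes_spec : Claim_equal_find_all_common_prefixes := by
  intro subjects min_count _dom
  unfold Spec_find_all_common_prefixes
  unfold find_all_common_prefixes find_all_common_prefixes_alt
  -- A's result, frozen to the filtered item list of the size image of its dict of sets
  have hempty : (PySem.Dict.empty : PySem.Dict String Int)
      = pvSizes (PySem.Dict.empty : PySem.Dict String (PySem.Set String)) := rfl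
  have hkeys0 : (PySem.Dict.empty : PySem.Dict String (PySem.Set String)).keys.Nodup := by
    simp [PySem.Dict.empty, PySem.Dict.keys]
  have h3 : ∀ k t, t ∈ (PySem.Dict.empty : PySem.Dict String (PySem.Set String)).getD k PySem.Set.empty
      → t ∈ (PySem.Set.empty : PySem.Set String) := by
    intro k t h
    simp [PySem.Dict.empty, PySem.Dict.getD, PySem.Dict.get?, PySem.Set.empty] at h
  have h4 : ∀ t, t ∈ (PySem.Set.empty : PySem.Set String) → ∀ ic ∈ pvL t,
      t ∈ (PySem.Dict.empty : PySem.Dict String (PySem.Set String)).getD (pvPre t ic.1) PySem.Set.empty := by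
    intro t ht
    simp [PySem.Set.empty] at ht
  have houter := pvCtrOuter subjects PySem.Dict.empty PySem.Dict.empty PySem.Set.empty hempty hkeys0 h3 h4
  set dA := subjects.foldl pvSubjectStepA (PySem.Dict.empty : PySem.Dict String (PySem.Set String)) with hdA
  have hkeys : (pvSizes dA).keys.Nodup := by
    rw [pvSizes_keys]
    exact pvKeysFold subjects PySem.Dict.empty hkeys0
  have hknodup : ((pvSizes dA).items.map Prod.fst).Nodup := by
    have : (pvSizes dA).keys = (pvSizes dA).items.map Prod.fst := rfl
    rw [← this]; exact hkeys
  have hfold2 :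
      dA.items.foldl
        (fun r pe =>
          if PySem.Set.len pe.2 ≥ min_count then PySem.Dict.insert r pe.1 (PySem.Set.len pe.2)
          else r) PySem.Dict.empty
      = (pvSizes dA).items.foldl
          (fun r q => if q.2 ≥ min_count then PySem.Dict.insert r q.1 q.2 else r)
          PySem.Dict.empty := by
    show _ = ((dA.items.map (fun p => (p.1, PySem.Set.len p.2))).foldl _ _)
    rw [List.foldl_map]
  have hres := pvResult min_count (pvSizes dA).items PySem.Dict.empty hknodup
    (by intro k hk; simp [PySem.Dict.empty, PySem.Dict.contains] at hk)
  -- B's result, through the trie invariant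
  obtain ⟨ch', cnt', dp', g', hfold, hinv'⟩ :=
    pvTrieOuter subjects [PySem.Dict.empty] [0] [] [[]] PySem.Dict.empty PySem.Set.empty pvInv0
  simp only [hfold, hfold2, hres]
  have hmapB : dp'.map (fun pn => (pn.1, cnt'.getD pn.2 0)) = (pvSizes dA).items := by
    rw [hinv'.hmap, houter]
  have hfc : dp'.filter (fun pn => decide (cnt'.getD pn.2 0 ≥ min_count))
      = dp'.filter ((fun q : String × Int => decide (q.2 ≥ min_count))
          ∘ (fun pn => (pn.1, cnt'.getD pn.2 0))) :=
    List.filter_congr (fun a _ => rfl)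
  rw [hfc, ← List.filter_map, hmapB]
  simp [PySem.Dict.empty]
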